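-- pv_equiv track=rewrite | github.com/JiniousChoi/encyclopedia-in-code | tools/bbobki.py | _carriable
-- ===== SOURCE A (Python) =====
-- from operator import mul, itemgetter
-- from functools import reduce
--
-- def _carriable(len_ls, cnt_ls):
--     #e.g. (2,2,2)/(0,1,2) is carriable
--     #e.g. (2,2,2)/(1,1,2) is not carriable
--     max_val = reduce(mul, len_ls, 1)
--     weight_ls = []
--     for i in range(len(len_ls)):
--         v = reduce(mul, len_ls[i+1:], 1)
--         weight_ls.append(v)
--
--     cur_val = sum([a*b for a,b in zip(weight_ls, cnt_ls)])
--     return max_val > cur_val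
-- ===== SOURCE B (Python) =====
-- def _carriable(len_ls, cnt_ls):
--     # one reverse pass: accumulate suffix products instead of recomputing each slice product
--     total = 0
--     p = 1
--     m = len(cnt_ls)
--     for i in range(len(len_ls) - 1, -1, -1):
--         if i < m:
--             total += cnt_ls[i] * p
--         p *= len_ls[i]
--     return p > total
-- ===== Notes on version B (the rewrite author's own statement) =====
-- stated objective: faster
-- what changed: replaces the per-index slice product reduce(mul, len_ls[i+1:]) recomputed for every i by a single reverse pass that maintains a running suffix product while accumulating the weighted count sum
import Mathlib
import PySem

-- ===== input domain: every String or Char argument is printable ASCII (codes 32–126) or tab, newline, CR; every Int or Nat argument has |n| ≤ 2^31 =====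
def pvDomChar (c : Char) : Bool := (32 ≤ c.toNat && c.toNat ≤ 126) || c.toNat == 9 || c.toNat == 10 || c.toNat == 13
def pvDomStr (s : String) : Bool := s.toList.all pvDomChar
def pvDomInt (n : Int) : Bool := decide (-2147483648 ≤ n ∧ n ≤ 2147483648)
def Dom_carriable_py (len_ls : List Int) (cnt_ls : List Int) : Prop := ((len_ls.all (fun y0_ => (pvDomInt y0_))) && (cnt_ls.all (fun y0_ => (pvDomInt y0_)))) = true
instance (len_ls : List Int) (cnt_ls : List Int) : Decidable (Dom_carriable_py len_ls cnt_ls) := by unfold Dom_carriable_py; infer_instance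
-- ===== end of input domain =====

-- B replaces A's per-index slice products (quadratic) by one reverse pass that
-- accumulates the running suffix product (objective: faster, asymptotic).

-- ===== PORT A =====
-- literal port of _carriable: total product, per-index slice products, weighted sum
def carriable_py (len_ls : List Int) (cnt_ls : List Int) : Bool :=
  let max_val : Int := len_ls.foldl (· * ·) 1
  let weight_ls : List Int :=
    (PySem.List.pyRange 0 (len_ls.length : Int) 1).foldl
      (fun acc i => acc ++ [(PySem.List.slice len_ls (some (i + 1)) none).foldl (· * ·) 1]) []
  let cur_val : Int := ((weight_ls.zip cnt_ls).map (fun p => p.1 * p.2)).sum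
  decide (max_val > cur_val)

-- ===== PORT B =====
-- literal port of Source B: one descending loop, running suffix product p
def carriable_py_alt (len_ls : List Int) (cnt_ls : List Int) : Bool :=
  let m : Int := cnt_ls.length
  let st : Int × Int :=
    (PySem.List.pyRange ((len_ls.length : Int) - 1) (-1) (-1)).foldl
      (fun st i =>
        let total : Int := if i < m then st.1 + PySem.List.pyGetD cnt_ls i 0 * st.2 else st.1
        (total, st.2 * PySem.List.pyGetD len_ls i 0))
      (0, 1)
  decide (st.2 > st.1)

-- ===== PRECONDITION & SPEC =====
def Spec_carriable_py (len_ls : List Int) (cnt_ls : List Int) (out : Bool) : Prop := out = carriable_py_alt len_ls cnt_ls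
instance (len_ls : List Int) (cnt_ls : List Int) (out : Bool) : Decidable (Spec_carriable_py len_ls cnt_ls out) := by unfold Spec_carriable_py; infer_instance

-- ===== CLAIM (what is proved, stated in full; the proofs are below) =====
def Claim_equal_carriable_py : Prop := ∀ (len_ls : List Int) (cnt_ls : List Int), Dom_carriable_py len_ls cnt_ls → Spec_carriable_py len_ls cnt_ls (carriable_py len_ls cnt_ls)

-- ===== LEMMAS AND PROOFS =====

-- suffix product of the whole list, recursing on the head
def pvProd : List Int → Int
  | [] => 1
  | x :: xs => pvProd xs * x

-- the weighted sum Σ cnt[i] * prod(len[i+1:]) over the common indices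
def pvSum : List Int → List Int → Int
  | [], _ => 0
  | _ :: xs, [] => pvSum xs []
  | _ :: xs, c :: cs => pvSum xs cs + c * pvProd xs

-- B's loop body, over a Nat index
def pvBody (len_ls cnt_ls : List Int) (k : Nat) (st : Int × Int) : Int × Int :=
  (if k < cnt_ls.length then st.1 + cnt_ls.getD k 0 * st.2 else st.1,
   st.2 * len_ls.getD k 0)

theorem pvSum_nil_right (xs : List Int) : pvSum xs [] = 0 := by
  induction xs with
  | nil => rfl
  | cons x xs ih => simpa [pvSum] using ih

theorem pvBody_shift (x : Int) (xs cs : List Int) (k : Nat) :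
    pvBody (x :: xs) cs (k + 1) = pvBody xs cs.tail k := by
  funext st
  cases cs <;> simp [pvBody]

theorem foldr_range_pvBody (xs : List Int) (cs : List Int) :
    (List.range xs.length).foldr (pvBody xs cs) (0, 1) = (pvSum xs cs, pvProd xs) := by
  induction xs generalizing cs with
  | nil => rfl
  | cons x xs ih =>
    have hshift : (fun k => pvBody (x :: xs) cs (k + 1)) = pvBody xs cs.tail := by
      funext k; exact pvBody_shift x xs cs k
    calc (List.range (x :: xs).length).foldr (pvBody (x :: xs) cs) (0, 1)
        = pvBody (x :: xs) cs 0
            (((List.range xs.length).map Nat.succ).foldr (pvBody (x :: xs) cs) (0, 1)) := by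
          rw [List.length_cons, List.range_succ_eq_map]; rfl
      _ = pvBody (x :: xs) cs 0
            ((List.range xs.length).foldr (pvBody xs cs.tail) (0, 1)) := by
          simp only [List.foldr_map, Nat.succ_eq_add_one, hshift]
      _ = pvBody (x :: xs) cs 0 (pvSum xs cs.tail, pvProd xs) := by rw [ih]
      _ = (pvSum (x :: xs) cs, pvProd (x :: xs)) := by
          cases cs with
          | nil => simp [pvBody, pvSum, pvProd]
          | cons c cs' => simp [pvBody, pvSum, pvProd]

theorem foldl_mul_eq (xs : List Int) (a : Int) : xs.foldl (· * ·) a = a * pvProd xs := by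
  induction xs generalizing a with
  | nil => simp [pvProd]
  | cons x xs ih => simp [List.foldl_cons, ih, pvProd]; ring

-- A's weighted sum equals pvSum
theorem zip_sum_eq (xs cs : List Int) :
    ((((List.range xs.length).map (fun k => (xs.drop (k + 1)).foldl (· * ·) 1)).zip cs).map
        (fun p => p.1 * p.2)).sum = pvSum xs cs := by
  induction xs generalizing cs with
  | nil => cases cs <;> simp [pvSum]
  | cons x xs ih =>
    rw [List.length_cons, List.range_succ_eq_map, List.map_cons, List.map_map]
    have hmap : ((fun k => ((x :: xs).drop (k + 1)).foldl (· * ·) 1) ∘ Nat.succ)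
        = fun k => (xs.drop (k + 1)).foldl (· * ·) 1 := by
      funext k; simp [List.drop_succ_cons]
    rw [hmap]
    cases cs with
    | nil => simp [pvSum_nil_right]
    | cons c cs' =>
      simp only [List.zip_cons_cons, List.map_cons, List.sum_cons, ih, pvSum]
      rw [List.drop_one, List.tail_cons, foldl_mul_eq]
      ring

-- B's port reduces to the foldr over List.range
theorem alt_eq (len_ls cnt_ls : List Int) :
    carriable_py_alt len_ls cnt_ls =
      decide ((pvProd len_ls) > (pvSum len_ls cnt_ls)) := by
  unfold carriable_py_alt
  have h1 : PySem.List.pyRange ((len_ls.length : Int) - 1) (-1) (-1)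
      = (PySem.List.pyRange 0 (len_ls.length : Int) 1).reverse := by
    have := PySem.List.pyRange_neg_one_eq_reverse ((len_ls.length : Int) - 1) (-1)
    simpa using this
  simp only [h1, List.foldl_reverse, PySem.List.pyRange_one, sub_zero, Int.toNat_natCast,
    zero_add, List.foldr_map]
  have hbody : (fun (k : Nat) (st : Int × Int) =>
      ((if (k : Int) < (cnt_ls.length : Int) then st.1 + PySem.List.pyGetD cnt_ls (k : Int) 0 * st.2 else st.1),
        st.2 * PySem.List.pyGetD len_ls (k : Int) 0)) = pvBody len_ls cnt_ls := by
    funext k st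
    simp [pvBody, PySem.List.pyGetD_natCast]
  rw [hbody, foldr_range_pvBody]

-- A's port reduces to the same comparison
theorem a_eq (len_ls cnt_ls : List Int) :
    carriable_py len_ls cnt_ls =
      decide ((pvProd len_ls) > (pvSum len_ls cnt_ls)) := by
  unfold carriable_py
  have hwl : (PySem.List.pyRange 0 (len_ls.length : Int) 1).foldl
      (fun acc i => acc ++ [(PySem.List.slice len_ls (some (i + 1)) none).foldl (· * ·) 1]) []
      = (List.range len_ls.length).map (fun k => (len_ls.drop (k + 1)).foldl (· * ·) 1) := by
    rw [PySem.List.foldl_append_singleton_eq_map, PySem.List.pyRange_one]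
    simp only [sub_zero, Int.toNat_natCast, zero_add, List.map_map]
    refine List.map_congr_left (fun k _ => ?_)
    have hc : ((k : Int) + 1) = ((k + 1 : Nat) : Int) := by push_cast; ring
    simp only [Function.comp_apply]
    rw [hc, PySem.List.slice_from_natCast]
  simp only [hwl]
  rw [zip_sum_eq len_ls cnt_ls, foldl_mul_eq, one_mul]

-- ===== VERDICT (by name: the statement is the Claim_ definition above) =====
theorem carriable_py_spec : Claim_equal_carriable_py := by
  intro len_ls cnt_ls _
  unfold Spec_carriable_py
  rw [a_eq, alt_eq]
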